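-- pv_equiv track=rewrite | github.com/srv1n/editops-skills | skills/video-clipper/scripts/clip_director.py | _looks_like_sponsor
-- ===== SOURCE A (Python) =====
-- def _looks_like_sponsor(text: str) -> bool:
--     s = str(text or "").lower()
--     patterns = [
--         "sponsor",
--         "sponsored",
--         "brought to you by",
--         "promo code",
--         "discount code",
--         "go to ",
--         "dot com",
--         " slash ",
--         "hubermanlab.com",
--         "drinkag1.com",
--         "wakingup.com",
--         "functionhealth.com",
--         "helixsleep.com",
--     ]
--     return any(p in s for p in patterns)
-- ===== SOURCE B (Python) =====
-- _PATTERNS = [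
--     "sponsor",
--     "sponsored",
--     "brought to you by",
--     "promo code",
--     "discount code",
--     "go to ",
--     "dot com",
--     " slash ",
--     "hubermanlab.com",
--     "drinkag1.com",
--     "wakingup.com",
--     "functionhealth.com",
--     "helixsleep.com",
-- ]
--
-- def _looks_like_sponsor(text: str) -> bool:
--     s = str(text or "").lower()
--     for i in range(len(s)):
--         tail = s[i:]
--         for p in _PATTERNS:
--             if tail.startswith(p):
--                 return True
--     return False
-- ===== Notes on version B (the rewrite author's own statement) =====
-- stated objective: alternative
-- what changed: Replaces A's thirteen independent substring scans ('p in s' per pattern) with a single left-to-right pass over the positions of the lowered string, checking at each position whether any pattern starts there.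
import Mathlib
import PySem

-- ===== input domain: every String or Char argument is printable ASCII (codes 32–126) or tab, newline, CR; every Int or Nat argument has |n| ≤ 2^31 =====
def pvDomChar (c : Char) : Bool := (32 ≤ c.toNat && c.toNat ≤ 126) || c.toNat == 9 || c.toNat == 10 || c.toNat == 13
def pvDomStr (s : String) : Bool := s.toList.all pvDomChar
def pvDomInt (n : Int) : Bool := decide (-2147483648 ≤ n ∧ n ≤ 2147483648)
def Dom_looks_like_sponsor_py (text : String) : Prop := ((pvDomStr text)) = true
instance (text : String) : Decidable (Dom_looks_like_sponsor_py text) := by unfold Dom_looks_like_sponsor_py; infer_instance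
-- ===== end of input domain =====

-- B replaces A's thirteen independent 'p in s' substring scans with one left-to-right
-- pass over the positions of the lowered string (objective: alternative, not faster).

-- ===== PORT A =====
-- the literal pattern list of A
def pvSponsorPatterns : List String :=
  ["sponsor", "sponsored", "brought to you by", "promo code", "discount code",
   "go to ", "dot com", " slash ", "hubermanlab.com", "drinkag1.com",
   "wakingup.com", "functionhealth.com", "helixsleep.com"]

-- A: s = str(text or "").lower(); return any(p in s for p in patterns)
-- ('text or ""' is the identity on str inputs: "" stays "")
def looks_like_sponsor_py (text : String) : Bool :=
  let s := PySem.Str.lower text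
  pvSponsorPatterns.any (fun p => PySem.Str.isIn p s)

-- ===== PORT B =====
-- B's inner loop: does any pattern start at the head of this suffix?
def pvAnyStartsHere (pats : List (List Char)) (cs : List Char) : Bool :=
  pats.any (fun p => PySem.Chars.startswith cs p)

-- B's outer loop: 'for i in range(len(s)): tail = s[i:]; …' — one pass over the
-- (nonempty) suffixes of s, transcribed as structural recursion on the char list.
def pvScanSuffixes (pats : List (List Char)) : List Char → Bool
  | [] => false
  | c :: rest =>
      if pvAnyStartsHere pats (c :: rest) then true else pvScanSuffixes pats rest

def looks_like_sponsor_py_alt (text : String) : Bool :=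
  let s := PySem.Str.lower text
  pvScanSuffixes (pvSponsorPatterns.map String.toList) s.toList

-- ===== PRECONDITION & SPEC =====
def Spec_looks_like_sponsor_py (text : String) (out : Bool) : Prop := out = looks_like_sponsor_py_alt text
instance (text : String) (out : Bool) : Decidable (Spec_looks_like_sponsor_py text out) := by unfold Spec_looks_like_sponsor_py; infer_instance

-- ===== CLAIM (what is proved, stated in full; the proofs are below) =====
def Claim_equal_looks_like_sponsor_py : Prop := ∀ (text : String), Dom_looks_like_sponsor_py text → Spec_looks_like_sponsor_py text (looks_like_sponsor_py text)

-- ===== LEMMAS AND PROOFS =====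

-- The suffix scan finds exactly the patterns that occur as an infix (given no pattern is empty).
theorem pvScanSuffixes_eq_any_isIn (pats : List (List Char)) (h : ∀ p ∈ pats, p ≠ [])
    (cs : List Char) :
    pvScanSuffixes pats cs = pats.any (fun p => PySem.Chars.isIn p cs) := by
  induction cs with
  | nil =>
    simp only [pvScanSuffixes]
    symm
    rw [List.any_eq_false]
    intro p hp
    rw [Bool.not_eq_true, PySem.Chars.isIn_eq_false_iff]
    intro hinf
    exact h p hp (List.eq_nil_of_infix_nil hinf)
  | cons c rest ih =>
    simp only [pvScanSuffixes, ih]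
    rw [Bool.eq_iff_iff]
    constructor
    · intro hx
      split_ifs at hx with hs
      · rcases List.any_eq_true.mp hs with ⟨p, hp, hpw⟩
        exact List.any_eq_true.mpr ⟨p, hp,
          (PySem.Chars.isIn_iff_infix _ _).mpr ((PySem.Chars.startswith_iff _ _).mp hpw).isInfix⟩
      · rcases List.any_eq_true.mp hx with ⟨p, hp, hpw⟩
        exact List.any_eq_true.mpr ⟨p, hp,
          (PySem.Chars.isIn_iff_infix _ _).mpr (List.infix_cons ((PySem.Chars.isIn_iff_infix _ _).mp hpw))⟩
    · intro hx
      rcases List.any_eq_true.mp hx with ⟨p, hp, hpw⟩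
      rcases (List.infix_cons_iff.mp ((PySem.Chars.isIn_iff_infix _ _).mp hpw)) with hpre | hinf
      · have : pvAnyStartsHere pats (c :: rest) = true :=
          List.any_eq_true.mpr ⟨p, hp, (PySem.Chars.startswith_iff _ _).mpr hpre⟩
        simp [this]
      · have : pats.any (fun p => PySem.Chars.isIn p rest) = true :=
          List.any_eq_true.mpr ⟨p, hp, (PySem.Chars.isIn_iff_infix _ _).mpr hinf⟩
        split_ifs <;> simp [this]

-- ===== VERDICT (by name: the statement is the Claim_ definition above) =====
theorem looks_like_sponsor_py_spec : Claim_equal_looks_like_sponsor_py := by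
  intro text _
  unfold Spec_looks_like_sponsor_py looks_like_sponsor_py looks_like_sponsor_py_alt
  rw [pvScanSuffixes_eq_any_isIn _ (by decide)]
  simp [List.any_map, PySem.Str.isIn, Function.comp_def]
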